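-- pv_equiv track=rewrite | github.com/UpayanGhosh/Synapse-OSS | workspace/sci_fi_dashboard/multiuser/transcript.py | limit_history_turns
-- ===== SOURCE A (Python) =====
-- def limit_history_turns(messages: list[dict], limit: int) -> list[dict]:
--     """Return the tail of *messages* that contains exactly *limit* user turns.
--
--     Walks backwards counting ``role == "user"`` entries.  The slice starts
--     immediately after the ``limit``-th-from-end user turn.
--
--     If there are fewer than *limit* user turns, the full list is returned.
--     """
--     user_count = 0
--     for i in range(len(messages) - 1, -1, -1):
--         if messages[i].get("role") == "user":
--             user_count += 1
--             if user_count > limit: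
--                 return messages[i + 1 :]
--     return messages
-- ===== SOURCE B (Python) =====
-- def limit_history_turns(messages: list[dict], limit: int) -> list[dict]:
--     """Single forward pass: build the table of user-turn indices, then cut
--     directly after the (limit+1)-th user turn from the end, if any."""
--     users = [i for i, m in enumerate(messages) if m.get("role") == "user"]
--     eff = max(limit, 0)
--     if len(users) > eff:
--         return messages[users[len(users) - 1 - eff] + 1:]
--     return messages
-- ===== Notes on version B (the rewrite author's own statement) =====
-- stated objective: alternative
-- what changed: Replaces A's backward scan that counts user turns with an early return by a single forward pass building the table of user-turn indices and then cutting the list directly after the (limit+1)-th user turn from the end, computed by indexing into that table.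
import Mathlib
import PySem

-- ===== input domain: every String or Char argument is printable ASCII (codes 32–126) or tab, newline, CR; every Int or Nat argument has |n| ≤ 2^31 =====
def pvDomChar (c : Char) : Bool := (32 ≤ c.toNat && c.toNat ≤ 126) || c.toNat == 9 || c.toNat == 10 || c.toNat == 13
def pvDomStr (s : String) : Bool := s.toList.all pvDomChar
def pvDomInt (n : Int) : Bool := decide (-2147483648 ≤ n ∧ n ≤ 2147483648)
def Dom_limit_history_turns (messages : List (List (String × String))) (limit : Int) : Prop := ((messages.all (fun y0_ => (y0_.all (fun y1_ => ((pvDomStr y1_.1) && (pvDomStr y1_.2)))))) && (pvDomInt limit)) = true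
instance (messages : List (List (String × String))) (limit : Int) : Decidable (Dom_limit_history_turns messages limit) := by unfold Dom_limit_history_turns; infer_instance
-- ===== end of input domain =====

-- B replaces A's backward counting scan (early return) by one forward pass that
-- tabulates the user-turn indices and cuts directly after the right one;
-- alternative decomposition, same cost.

-- ===== PORT A =====
-- the backward 'for i in range(len(messages)-1, -1, -1)' loop with early return
def goA (messages : List (List (String × String))) (limit : Int) :
    List Int → Int → List (List (String × String))
  | [], _ => messages
  | i :: rest, cnt =>
    if PySem.Dict.get? (PySem.Dict.mk (PySem.List.pyGetD messages i [])) "role" == some "user" then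
      if cnt + 1 > limit then PySem.List.slice messages (some (i + 1)) none
      else goA messages limit rest (cnt + 1)
    else goA messages limit rest cnt

def limit_history_turns (messages : List (List (String × String))) (limit : Int) :
    List (List (String × String)) :=
  goA messages limit (PySem.List.pyRange ((messages.length : Int) - 1) (-1) (-1)) 0

-- ===== PORT B =====
def limit_history_turns_alt (messages : List (List (String × String))) (limit : Int) :
    List (List (String × String)) :=
  let users := (PySem.List.enumerate messages 0).filterMap
    (fun p => if PySem.Dict.get? (PySem.Dict.mk p.2) "role" == some "user" then some p.1 else none)
  let eff := max limit 0
  if (users.length : Int) > eff then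
    PySem.List.slice messages
      (some (PySem.List.pyGetD users ((users.length : Int) - 1 - eff) 0 + 1)) none
  else messages

-- ===== PRECONDITION & SPEC =====
def Spec_limit_history_turns (messages : List (List (String × String))) (limit : Int) (out : List (List (String × String))) : Prop := out = limit_history_turns_alt messages limit
instance (messages : List (List (String × String))) (limit : Int) (out : List (List (String × String))) : Decidable (Spec_limit_history_turns messages limit out) := by unfold Spec_limit_history_turns; infer_instance

-- ===== CLAIM (what is proved, stated in full; the proofs are below) =====
def Claim_equal_limit_history_turns : Prop := ∀ (messages : List (List (String × String))) (limit : Int), Dom_limit_history_turns messages limit → Spec_limit_history_turns messages limit (limit_history_turns messages limit)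

-- ===== LEMMAS AND PROOFS =====

-- whether a message dict is a user turn
def isU (m : List (String × String)) : Bool := PySem.Dict.get? (PySem.Dict.mk m) "role" == some "user"

-- the (increasing) list of user-turn indices of a message list
def uidx : List (List (String × String)) → List Nat
  | [] => []
  | x :: xs => if isU x then 0 :: (uidx xs).map (· + 1) else (uidx xs).map (· + 1)

theorem uidx_append_singleton (ys : List (List (String × String))) (y : List (String × String)) :
    uidx (ys ++ [y]) = uidx ys ++ (if isU y then [ys.length] else []) := by
  induction ys with
  | nil => by_cases h : isU y <;> simp [uidx, h]
  | cons x ys ih =>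
    simp only [List.cons_append, uidx, ih]
    split <;> split <;> simp

theorem filterMap_enumerate (xs : List (List (String × String))) (s : Int) :
    (PySem.List.enumerate xs s).filterMap
      (fun p => if PySem.Dict.get? (PySem.Dict.mk p.2) "role" == some "user" then some p.1 else none)
      = (uidx xs).map (fun i : Nat => s + (i : Int)) := by
  induction xs generalizing s with
  | nil => simp [PySem.List.enumerate_nil, uidx]
  | cons x xs ih =>
    rw [PySem.List.enumerate_cons]
    simp only [List.filterMap_cons, uidx, ih,
      show (PySem.Dict.get? (PySem.Dict.mk x) "role" == some "user") = isU x from rfl]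
    by_cases h : isU x <;>
      simp [h, List.map_map, Function.comp_def] <;>
      exact fun i _ => by ring

theorem goA_eq (messages : List (List (String × String))) (limit : Int) (m c : Nat)
    (hm : m ≤ messages.length) (hc : c ≤ limit.toNat) :
    goA messages limit (PySem.List.pyRange ((m : Int) - 1) (-1) (-1)) (c : Int) =
      (if limit.toNat < c + (uidx (messages.take m)).length
       then List.drop ((uidx (messages.take m)).getD
              ((uidx (messages.take m)).length - 1 - (limit.toNat - c)) 0 + 1) messages
       else messages) := by
  induction m generalizing c with
  | zero =>
    rw [PySem.List.pyRange_neg_one_eq_nil (by norm_num)]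
    simp only [goA, List.take_zero]
    rw [if_neg (by simp [uidx]; omega)]
  | succ k ih =>
    have hk : k < messages.length := hm
    rw [show ((k + 1 : Nat) : Int) - 1 = (k : Int) by push_cast; ring]
    rw [PySem.List.pyRange_neg_one_cons (by omega)]
    simp only [goA]
    rw [PySem.List.pyGetD_natCast, List.getD_eq_getElem _ _ hk]
    have htake : messages.take (k + 1) = messages.take k ++ [messages[k]] := by
      rw [List.take_add_one]; simp [List.getElem?_eq_getElem hk]
    rw [htake, uidx_append_singleton]
    have hlen : (messages.take k).length = k := by simp; omega
    rw [hlen]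
    by_cases hu : isU messages[k]
    · rw [show (PySem.Dict.get? (PySem.Dict.mk messages[k]) "role" == some "user") = isU messages[k]
            from rfl, hu]
      simp only [if_true]
      by_cases hcc : (c : Int) + 1 > limit
      · rw [if_pos hcc]
        rw [show (k : Int) + 1 = ((k + 1 : Nat) : Int) by push_cast; ring,
            PySem.List.slice_from_natCast]
        rw [if_pos (by simp; omega)]
        have hidx : (uidx (messages.take k) ++ [k]).length - 1 - (limit.toNat - c)
            = (uidx (messages.take k)).length := by simp; omega
        rw [hidx]
        simp
      · rw [if_neg hcc]
        rw [show (c : Int) + 1 = ((c + 1 : Nat) : Int) by push_cast; ring,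
            ih (c + 1) (by omega) (by omega)]
        by_cases hcond : limit.toNat < c + 1 + (uidx (messages.take k)).length
        · rw [if_pos hcond, if_pos (by simp; omega)]
          have hidx : (uidx (messages.take k) ++ [k]).length - 1 - (limit.toNat - c)
              = (uidx (messages.take k)).length - 1 - (limit.toNat - (c + 1)) := by simp; omega
          rw [hidx, List.getD_append]
          omega
        · rw [if_neg hcond, if_neg (by simp; omega)]
    · simp only [Bool.not_eq_true] at hu
      rw [show (PySem.Dict.get? (PySem.Dict.mk messages[k]) "role" == some "user") = isU messages[k]
            from rfl, hu]
      simp only [Bool.false_eq_true, if_false, List.append_nil]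
      exact ih c (by omega) hc

-- ===== VERDICT (by name: the statement is the Claim_ definition above) =====
theorem limit_history_turns_spec : Claim_equal_limit_history_turns := by
  intro messages limit _
  show limit_history_turns messages limit = limit_history_turns_alt messages limit
  unfold limit_history_turns limit_history_turns_alt
  have hA := goA_eq messages limit messages.length 0 le_rfl (Nat.zero_le _)
  simp only [Nat.cast_zero] at hA
  rw [hA]
  simp only [filterMap_enumerate, List.take_length, List.length_map, Nat.sub_zero, zero_add]
  by_cases h : limit.toNat < (uidx messages).length
  · rw [if_pos (by omega), if_pos (by omega)]
    have hj : (uidx messages).length - 1 - limit.toNat < (uidx messages).length := by omega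
    have hidx : ((uidx messages).length : Int) - 1 - max limit 0
        = (((uidx messages).length - 1 - limit.toNat : Nat) : Int) := by omega
    rw [hidx, PySem.List.pyGetD_natCast,
      List.getD_eq_getElem _ _ (by simpa using hj)]
    rw [List.getD_eq_getElem _ _ (show (uidx messages).length - 1 - limit.toNat
          < (List.map (fun i : Nat => (i : Int)) (uidx messages)).length by simpa using hj),
        List.getElem_map]
    rw [show ((uidx messages)[(uidx messages).length - 1 - limit.toNat] : Int) + 1
          = (((uidx messages)[(uidx messages).length - 1 - limit.toNat] + 1 : Nat) : Int)
        by push_cast; ring, PySem.List.slice_from_natCast]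
  · rw [if_neg (by omega), if_neg (by omega)]
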